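-- pv_equiv track=rewrite | github.com/jj55222/FlameOn | pipeline2_discovery/casegraph/resolvers/orchestrator.py | _validate_allow_list
-- ===== SOURCE A (Python) =====
-- from typing import Any, Dict, Iterable, List, Optional, Sequence
--
-- RESOLVER_NAMES = ("muckrock", "documentcloud", "courtlistener", "youtube")
--
-- def _validate_allow_list(allow_list: Optional[Sequence[str]]) -> List[str]:
--     if allow_list is None:
--         return list(RESOLVER_NAMES)
--     cleaned: List[str] = []
--     for name in allow_list:
--         if name not in RESOLVER_NAMES:
--             raise ValueError(
--                 f"unknown resolver {name!r}; allowed names: {sorted(RESOLVER_NAMES)}"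
--             )
--         if name not in cleaned:
--             cleaned.append(name)
--     return cleaned
-- ===== SOURCE B (Python) =====
-- RESOLVER_NAMES = ("muckrock", "documentcloud", "courtlistener", "youtube")
--
-- def _validate_allow_list(allow_list):
--     if allow_list is None:
--         return list(RESOLVER_NAMES)
--     allow_list = list(allow_list)
--     for name in allow_list:
--         if name not in RESOLVER_NAMES:
--             raise ValueError(
--                 f"unknown resolver {name!r}; allowed names: {sorted(RESOLVER_NAMES)}"
--             )
--     present = [r for r in RESOLVER_NAMES if r in allow_list]
--     return sorted(present, key=allow_list.index)
-- ===== Notes on version B (the rewrite author's own statement) =====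
-- stated objective: alternative
-- what changed: B validates in one pass and then builds the result the other way round: instead of scanning allow_list with a cleaned-accumulator, it takes the fixed RESOLVER_NAMES tuple, keeps the names present in allow_list, and sorts them by their first index in allow_list.
import Mathlib
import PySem

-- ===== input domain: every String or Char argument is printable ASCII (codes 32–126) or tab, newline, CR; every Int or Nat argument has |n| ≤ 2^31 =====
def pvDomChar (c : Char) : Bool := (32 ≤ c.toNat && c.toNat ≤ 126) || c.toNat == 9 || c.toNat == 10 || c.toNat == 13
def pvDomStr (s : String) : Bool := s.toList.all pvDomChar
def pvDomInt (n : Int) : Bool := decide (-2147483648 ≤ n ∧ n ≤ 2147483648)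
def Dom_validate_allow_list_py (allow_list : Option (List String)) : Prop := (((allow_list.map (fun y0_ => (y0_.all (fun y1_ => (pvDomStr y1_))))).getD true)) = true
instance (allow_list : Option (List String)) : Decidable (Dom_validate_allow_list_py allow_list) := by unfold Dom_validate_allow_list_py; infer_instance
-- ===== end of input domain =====

-- B validates in one pass, then rebuilds the result from the fixed RESOLVER_NAMES tuple sorted by
-- first occurrence in allow_list, instead of A's interleaved cleaned-accumulator with a 'not in' scan.

def RESOLVER_NAMES : List String := ["muckrock", "documentcloud", "courtlistener", "youtube"]

-- ===== PORT A =====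
-- A's for-loop over allow_list with the 'cleaned' accumulator; the 'raise ValueError' branch is
-- unreachable under Pre_ (the loop stops there returning the accumulator, a guard for totality only).
def pvALoop : List String → List String → List String
  | [], cleaned => cleaned
  | name :: rest, cleaned =>
    if RESOLVER_NAMES.contains name then
      if cleaned.contains name then pvALoop rest cleaned
      else pvALoop rest (cleaned ++ [name])
    else cleaned  -- raise ValueError (excluded by Pre_)

def validate_allow_list_py (allow_list : Option (List String)) : List String :=
  match allow_list with
  | none => RESOLVER_NAMES
  | some xs => pvALoop xs []

-- ===== PORT B =====
-- B's validation pass: true iff no name triggers the raise.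
def pvBValid : List String → Bool
  | [] => true
  | name :: rest => if RESOLVER_NAMES.contains name then pvBValid rest else false

def validate_allow_list_py_alt (allow_list : Option (List String)) : List String :=
  match allow_list with
  | none => RESOLVER_NAMES
  | some xs =>
    if pvBValid xs then
      -- present = [r for r in RESOLVER_NAMES if r in allow_list]; sorted(present, key=allow_list.index)
      -- (list.index is only called on present names, so the .getD 0 default is never used)
      PySem.List.sorted (RESOLVER_NAMES.filter (fun r => xs.contains r))
        (fun r => (PySem.List.index? xs r).getD 0) false
    else []  -- raise ValueError (excluded by Pre_)

-- ===== PRECONDITION & SPEC =====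
-- A raises ValueError on any name outside RESOLVER_NAMES; Pre_ excludes exactly those inputs.
def Pre_validate_allow_list_py (allow_list : Option (List String)) : Prop :=
  ∀ xs ∈ allow_list, ∀ n ∈ xs, n ∈ RESOLVER_NAMES

instance (allow_list : Option (List String)) : Decidable (Pre_validate_allow_list_py allow_list) := by
  unfold Pre_validate_allow_list_py; infer_instance

def pvWitness_validate_allow_list_py : Option (List String) :=
  some ["youtube", "muckrock", "youtube"]

def Spec_validate_allow_list_py (allow_list : Option (List String)) (out : List String) : Prop := out = validate_allow_list_py_alt allow_list
instance (allow_list : Option (List String)) (out : List String) : Decidable (Spec_validate_allow_list_py allow_list out) := by unfold Spec_validate_allow_list_py; infer_instance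

-- ===== CLAIM (what is proved, stated in full; the proofs are below) =====
def Claim_equal_validate_allow_list_py : Prop := ∀ (allow_list : Option (List String)), Dom_validate_allow_list_py allow_list → Pre_validate_allow_list_py allow_list → Spec_validate_allow_list_py allow_list (validate_allow_list_py allow_list)

-- ===== LEMMAS AND PROOFS =====

theorem pvBValid_of_pre (xs : List String) (h : ∀ n ∈ xs, n ∈ RESOLVER_NAMES) :
    pvBValid xs = true := by
  induction xs with
  | nil => rfl
  | cons x rest ih =>
    have hx : RESOLVER_NAMES.contains x = true := by
      simpa using h x (by simp)
    rw [pvBValid, if_pos hx]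
    exact ih (fun n hn => h n (by simp [hn]))

-- A's loop is list(dict-order dedup): foldl of Set.add.
theorem pvALoop_eq_foldl (xs : List String) (cleaned : List String)
    (h : ∀ n ∈ xs, n ∈ RESOLVER_NAMES) :
    pvALoop xs cleaned = xs.foldl PySem.Set.add cleaned := by
  induction xs generalizing cleaned with
  | nil => rfl
  | cons x rest ih =>
    have hx : RESOLVER_NAMES.contains x = true := by
      simpa using h x (by simp)
    have hrest : ∀ n ∈ rest, n ∈ RESOLVER_NAMES := fun n hn => h n (by simp [hn])
    simp only [pvALoop, hx, if_true, List.foldl_cons]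
    by_cases hc : x ∈ cleaned
    · rw [if_pos (by simpa using hc), ih _ hrest]
      simp [PySem.Set.add, PySem.Set.contains, hc]
    · rw [if_neg (by simpa using hc), ih _ hrest]
      simp [PySem.Set.add, PySem.Set.contains, hc]

-- the ordered dedup of xs lists its elements in strictly increasing first-occurrence order
theorem pairwise_idxOf_ofList (xs : List String) :
    List.Pairwise (fun a b => List.idxOf a xs < List.idxOf b xs) (PySem.Set.ofList xs) := by
  induction xs using List.reverseRecOn with
  | nil => simp [PySem.Set.ofList]
  | append_singleton xs x ih =>
    rw [PySem.Set.ofList_append_singleton]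
    have hstable : ∀ a, a ∈ PySem.Set.ofList xs →
        List.idxOf a (xs ++ [x]) = List.idxOf a xs := by
      intro a ha
      have : a ∈ xs := (PySem.Set.mem_ofList xs a).mp ha
      rw [List.idxOf_append, if_pos this]
    by_cases hx : x ∈ PySem.Set.ofList xs
    · have : (PySem.Set.ofList xs).add x = PySem.Set.ofList xs := by
        simp [PySem.Set.add, PySem.Set.contains, hx]
      rw [this]
      exact ih.imp_of_mem (fun ha hb h => by rw [hstable _ ha, hstable _ hb]; exact h)
    · have hxxs : x ∉ xs := fun h => hx ((PySem.Set.mem_ofList xs x).mpr h)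
      have : (PySem.Set.ofList xs).add x = PySem.Set.ofList xs ++ [x] := by
        simp [PySem.Set.add, PySem.Set.contains, hx]
      rw [this, List.pairwise_append]
      refine ⟨ih.imp_of_mem (fun ha hb h => by rw [hstable _ ha, hstable _ hb]; exact h),
        by simp, ?_⟩
      intro a ha b hb
      have hb' : b = x := by simpa using hb
      subst hb'
      have hax : a ∈ xs := (PySem.Set.mem_ofList xs a).mp ha
      rw [hstable _ ha, List.idxOf_append, if_neg hxxs]
      have h1 : List.idxOf a xs < xs.length := List.idxOf_lt_length_of_mem hax
      omega

-- sorted output: keys weakly increasing along the list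
theorem pairwise_key_sorted {α : Type} (l : List α) (key : α → ℕ) :
    List.Pairwise (fun a b => key a ≤ key b) (PySem.List.sorted l key false) := by
  rw [List.pairwise_iff_getElem]
  intro i j hi hj hij
  exact PySem.List.key_sorted_getElem_mono l key (Nat.le_of_lt hij) hj

-- first-occurrence index is injective on members of xs
theorem idxOf_inj_of_mem {a b : String} {xs : List String} (ha : a ∈ xs) (hb : b ∈ xs)
    (h : List.idxOf a xs = List.idxOf b xs) : a = b := by
  have h1 : List.idxOf a xs < xs.length := List.idxOf_lt_length_of_mem ha
  have h2 : List.idxOf b xs < xs.length := List.idxOf_lt_length_of_mem hb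
  have e1 : xs[List.idxOf a xs] = a := List.getElem_idxOf h1
  have e2 : xs[List.idxOf b xs] = b := List.getElem_idxOf h2
  rw [← e1, ← e2]
  simp [h]

-- ===== VERDICT (by name: the statement is the Claim_ definition above) =====
theorem validate_allow_list_py_spec : Claim_equal_validate_allow_list_py := by
  intro allow_list _ hpre
  unfold Spec_validate_allow_list_py
  match allow_list with
  | none => rfl
  | some xs =>
    have hpre' : ∀ n ∈ xs, n ∈ RESOLVER_NAMES := hpre xs rfl
    have hv := pvBValid_of_pre xs hpre'
    simp only [validate_allow_list_py, validate_allow_list_py_alt, hv, if_true]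
    rw [pvALoop_eq_foldl xs [] hpre', ← PySem.Set.ofList_eq_foldl]
    set key : String → ℕ := fun r => (PySem.List.index? xs r).getD 0 with hkey
    have hkey_mem : ∀ a ∈ xs, key a = List.idxOf a xs := by
      intro a ha
      have hs : (PySem.List.index? xs a).isSome := (PySem.List.index?_isSome_iff xs a).mpr ha
      obtain ⟨k, hk⟩ := Option.isSome_iff_exists.mp hs
      have hk' : List.idxOf? a xs = some k := by rw [← PySem.List.index?_eq_idxOf?]; exact hk
      simp only [hkey, hk, Option.getD_some, List.idxOf_eq_getD_idxOf?, hk']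
    set l₂ := PySem.List.sorted (RESOLVER_NAMES.filter (fun r => xs.contains r)) key false with hl₂
    have hmem₂ : ∀ a, a ∈ l₂ ↔ (a ∈ RESOLVER_NAMES ∧ a ∈ xs) := by
      intro a
      rw [hl₂, PySem.List.mem_sorted, List.mem_filter]
      simp
    have hnd₁ : (PySem.Set.ofList xs).Nodup := PySem.Set.nodup_ofList xs
    have hnd₂ : l₂.Nodup := by
      have : (RESOLVER_NAMES.filter (fun r => xs.contains r)).Nodup :=
        List.Nodup.filter _ (by decide)
      exact ((PySem.List.sorted_perm _ key false).nodup_iff).mpr this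
    have hperm : (PySem.Set.ofList xs).Perm l₂ := by
      rw [List.perm_ext_iff_of_nodup hnd₁ hnd₂]
      intro a
      rw [PySem.Set.mem_ofList, hmem₂]
      exact ⟨fun h => ⟨hpre' a h, h⟩, fun h => h.2⟩
    have hmem₁ : ∀ a ∈ PySem.Set.ofList xs, a ∈ xs :=
      fun a h => (PySem.Set.mem_ofList xs a).mp h
    refine List.Perm.eq_of_pairwise (le := fun a b => key a ≤ key b) ?_ ?_ ?_ hperm
    · intro a b ha hb h1 h2
      have hax : a ∈ xs := hmem₁ a ha
      have hbx : b ∈ xs := ((hmem₂ b).mp hb).2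
      have : key a = key b := Nat.le_antisymm h1 h2
      rw [hkey_mem a hax, hkey_mem b hbx] at this
      exact idxOf_inj_of_mem hax hbx this
    · refine (pairwise_idxOf_ofList xs).imp_of_mem (fun {a b} ha hb h => ?_)
      rw [hkey_mem a (hmem₁ a ha), hkey_mem b (hmem₁ b hb)]
      exact Nat.le_of_lt h
    · exact pairwise_key_sorted _ key
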